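-- pv_equiv track=rewrite | github.com/sachinbadgi/astroq-v2 | backend/lk_domain_fate_report.py | find_figure
-- ===== SOURCE A (Python) =====
-- def find_figure(name: str, figures: list):
--     nl = name.lower()
--     for fig in figures:
--         if fig.get("name", "").lower() == nl:
--             return fig
--     for fig in figures:
--         if nl in fig.get("name", "").lower():
--             return fig
--     return None
-- ===== SOURCE B (Python) =====
-- def find_figure(name: str, figures: list):
--     # Single pass: return on exact lowercased match immediately; remember the
--     # first substring match and return it after the loop.
--     nl = name.lower()
--     first_substring = None
--     for fig in figures:
--         fl = fig.get("name", "").lower()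
--         if fl == nl:
--             return fig
--         if first_substring is None and nl in fl:
--             first_substring = fig
--     return first_substring
-- ===== Notes on version B (the rewrite author's own statement) =====
-- stated objective: alternative
-- what changed: Replaces A's two sequential scans (exact match then substring match) with a single pass that returns immediately on an exact match while remembering the first substring match in an accumulator.
import Mathlib
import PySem

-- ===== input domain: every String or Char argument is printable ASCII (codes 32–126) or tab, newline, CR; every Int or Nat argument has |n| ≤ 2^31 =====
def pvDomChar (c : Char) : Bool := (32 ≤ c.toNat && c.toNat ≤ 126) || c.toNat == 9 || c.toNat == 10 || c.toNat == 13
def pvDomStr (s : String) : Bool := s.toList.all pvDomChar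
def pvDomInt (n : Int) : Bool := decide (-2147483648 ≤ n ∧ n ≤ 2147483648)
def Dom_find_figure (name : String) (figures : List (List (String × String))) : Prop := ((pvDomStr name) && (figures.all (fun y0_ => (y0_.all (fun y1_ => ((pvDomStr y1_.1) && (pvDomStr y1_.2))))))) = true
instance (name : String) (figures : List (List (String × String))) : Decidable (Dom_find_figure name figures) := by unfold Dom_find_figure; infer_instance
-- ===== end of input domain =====

-- B replaces A's two sequential scans with one pass that returns on an exact
-- match and remembers the first substring match; same return value everywhere.
-- ===== PORT A =====
-- first loop of A: return fig on exact lowered-name match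
def findExactA (nl : String) : List (List (String × String)) → Option (List (String × String))
  | [] => none
  | fig :: rest =>
      if PySem.Str.lower (PySem.Dict.getD (⟨fig⟩ : PySem.Dict String String) "name" "") == nl then some fig
      else findExactA nl rest

-- second loop of A: return fig on substring match
def findSubA (nl : String) : List (List (String × String)) → Option (List (String × String))
  | [] => none
  | fig :: rest =>
      if PySem.Str.isIn nl (PySem.Str.lower (PySem.Dict.getD (⟨fig⟩ : PySem.Dict String String) "name" "")) then some fig
      else findSubA nl rest

def find_figure (name : String) (figures : List (List (String × String))) : Option (List (String × String)) :=
  let nl := PySem.Str.lower name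
  match findExactA nl figures with
  | some fig => some fig
  | none =>
    match findSubA nl figures with
    | some fig => some fig
    | none => none

-- ===== PORT B =====
-- B's single loop, carrying the first_substring accumulator
def loopB (nl : String) (first : Option (List (String × String))) :
    List (List (String × String)) → Option (List (String × String))
  | [] => first
  | fig :: rest =>
      let fl := PySem.Str.lower (PySem.Dict.getD (⟨fig⟩ : PySem.Dict String String) "name" "")
      if fl == nl then some fig
      else if first == none && PySem.Str.isIn nl fl then loopB nl (some fig) rest
      else loopB nl first rest

def find_figure_alt (name : String) (figures : List (List (String × String))) : Option (List (String × String)) :=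
  loopB (PySem.Str.lower name) none figures

-- ===== PRECONDITION & SPEC =====
def Spec_find_figure (name : String) (figures : List (List (String × String))) (out : Option (List (String × String))) : Prop := out = find_figure_alt name figures
instance (name : String) (figures : List (List (String × String))) (out : Option (List (String × String))) : Decidable (Spec_find_figure name figures out) := by unfold Spec_find_figure; infer_instance

-- ===== CLAIM (what is proved, stated in full; the proofs are below) =====
def Claim_equal_find_figure : Prop := ∀ (name : String) (figures : List (List (String × String))), Dom_find_figure name figures → Spec_find_figure name figures (find_figure name figures)

-- ===== LEMMAS AND PROOFS =====

-- B's loop with accumulator `first` equals: exact match if any, else `first`,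
-- else the first substring match.
theorem loopB_eq (nl : String) (first : Option (List (String × String)))
    (l : List (List (String × String))) :
    loopB nl first l =
      (match findExactA nl l with
       | some fig => some fig
       | none => match first with
         | some f => some f
         | none => findSubA nl l) := by
  induction l generalizing first with
  | nil => cases first <;> simp [loopB, findExactA, findSubA]
  | cons fig rest ih =>
    simp only [loopB, findExactA, findSubA]
    by_cases hx : PySem.Str.lower (PySem.Dict.getD (⟨fig⟩ : PySem.Dict String String) "name" "") == nl
    · simp [hx]
    · simp only [hx]  -- exact branch not taken
      cases first with
      | some f => simp [ih]
      | none =>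
        cases hs : PySem.Chars.isIn nl.toList
            (PySem.Chars.lower ((PySem.Dict.getD (⟨fig⟩ : PySem.Dict String String) "name" "")).toList) <;>
          simp [hs, ih]

-- ===== VERDICT (by name: the statement is the Claim_ definition above) =====
theorem find_figure_spec : Claim_equal_find_figure := by
  intro name figures _
  unfold Spec_find_figure find_figure find_figure_alt
  rw [loopB_eq]
  cases hE : findExactA (PySem.Str.lower name) figures with
  | some f => simp [hE]
  | none => cases hS : findSubA (PySem.Str.lower name) figures <;> simp [hE, hS]
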